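-- pv_equiv track=rewrite | github.com/vrushalisarfare/PromptToProduct | specs/schema_processor.py | _evaluate_routing_rule
-- ===== SOURCE A (Python) =====
-- from typing import Dict, List, Any, Optional, Tuple
--
-- def _evaluate_routing_rule(rule: str, prompt_lower: str, context: Dict[str, Any]) -> bool:
--     """Evaluate if a routing rule matches the prompt and context."""
--     # Parse rule conditions
--     if "loan/mortgage/credit keywords" in rule and any(kw in prompt_lower for kw in ["loan", "mortgage", "credit", "lending"]):
--         return True
--     elif "payment/transfer/wire keywords" in rule and any(kw in prompt_lower for kw in ["payment", "transfer", "wire", "transaction"]):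
--         return True
--     elif "card/plastic/rewards keywords" in rule and any(kw in prompt_lower for kw in ["card", "plastic", "rewards", "credit card"]):
--         return True
--     elif "investment/portfolio/trading keywords" in rule and any(kw in prompt_lower for kw in ["investment", "portfolio", "trading", "wealth"]):
--         return True
--     elif "KYC/AML/compliance keywords" in rule and any(kw in prompt_lower for kw in ["kyc", "aml", "compliance", "regulation"]):
--         return True
--     elif "epic-level transformation" in rule and any(kw in prompt_lower for kw in ["epic", "platform", "system", "transformation"]):
--         return True
--     elif "implementation-focused" in rule and any(kw in prompt_lower for kw in ["implement", "create", "build", "develop"]):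
--         return True
--
--     return False
-- ===== SOURCE B (Python) =====
-- _MARKERS = [
--     "loan/mortgage/credit keywords",
--     "payment/transfer/wire keywords",
--     "card/plastic/rewards keywords",
--     "investment/portfolio/trading keywords",
--     "KYC/AML/compliance keywords",
--     "epic-level transformation",
--     "implementation-focused",
-- ]
--
-- _KEYWORDS = [
--     ["loan", "mortgage", "credit", "lending"],
--     ["payment", "transfer", "wire", "transaction"],
--     ["card", "plastic", "rewards", "credit card"],
--     ["investment", "portfolio", "trading", "wealth"],
--     ["kyc", "aml", "compliance", "regulation"],
--     ["epic", "platform", "system", "transformation"],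
--     ["implement", "create", "build", "develop"],
-- ]
--
-- def _evaluate_routing_rule(rule: str, prompt_lower: str, context) -> bool:
--     # Stage 1: bitmask of categories whose keywords appear in the prompt.
--     prompt_flags = 0
--     for i, kws in enumerate(_KEYWORDS):
--         if any(kw in prompt_lower for kw in kws):
--             prompt_flags |= 1 << i
--     # Stage 2: bitmask of categories whose marker appears in the rule.
--     rule_flags = 0
--     for i, marker in enumerate(_MARKERS):
--         if marker in rule:
--             rule_flags |= 1 << i
--     # Match iff some category is flagged on both sides.
--     return (prompt_flags & rule_flags) != 0
-- ===== Notes on version B (the rewrite author's own statement) =====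
-- stated objective: alternative
-- what changed: Replaced the interleaved if/elif ladder by a two-stage bitmask computation: one pass collects a bitmask of categories triggered by the prompt, a second pass collects a bitmask of markers present in the rule, and the result is whether the two masks intersect.
import Mathlib
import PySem

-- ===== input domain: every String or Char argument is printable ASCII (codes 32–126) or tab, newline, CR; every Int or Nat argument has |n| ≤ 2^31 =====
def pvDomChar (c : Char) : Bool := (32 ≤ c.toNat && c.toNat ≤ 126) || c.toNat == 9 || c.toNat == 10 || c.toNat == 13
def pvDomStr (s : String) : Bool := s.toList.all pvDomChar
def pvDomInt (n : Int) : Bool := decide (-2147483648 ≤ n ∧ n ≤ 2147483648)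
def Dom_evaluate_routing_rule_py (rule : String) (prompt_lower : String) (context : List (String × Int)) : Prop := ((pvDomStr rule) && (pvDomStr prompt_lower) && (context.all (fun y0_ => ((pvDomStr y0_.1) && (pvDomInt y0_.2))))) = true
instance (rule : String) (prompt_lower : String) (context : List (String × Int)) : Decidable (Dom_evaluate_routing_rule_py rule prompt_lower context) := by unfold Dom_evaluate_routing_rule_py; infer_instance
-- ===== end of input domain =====

-- B replaces A's interleaved if/elif ladder with a two-stage bitmask: a prompt-category mask and a rule-marker mask, returning whether they intersect (alternative decomposition; same behaviour).


-- ===== PORT A =====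
def evaluate_routing_rule_py (rule : String) (prompt_lower : String) (context : List (String × Int)) : Bool :=
  if PySem.Str.isIn "loan/mortgage/credit keywords" rule && (["loan", "mortgage", "credit", "lending"].any (fun kw => PySem.Str.isIn kw prompt_lower)) then
    true
  else if PySem.Str.isIn "payment/transfer/wire keywords" rule && (["payment", "transfer", "wire", "transaction"].any (fun kw => PySem.Str.isIn kw prompt_lower)) then
    true
  else if PySem.Str.isIn "card/plastic/rewards keywords" rule && (["card", "plastic", "rewards", "credit card"].any (fun kw => PySem.Str.isIn kw prompt_lower)) then
    true
  else if PySem.Str.isIn "investment/portfolio/trading keywords" rule && (["investment", "portfolio", "trading", "wealth"].any (fun kw => PySem.Str.isIn kw prompt_lower)) then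
    true
  else if PySem.Str.isIn "KYC/AML/compliance keywords" rule && (["kyc", "aml", "compliance", "regulation"].any (fun kw => PySem.Str.isIn kw prompt_lower)) then
    true
  else if PySem.Str.isIn "epic-level transformation" rule && (["epic", "platform", "system", "transformation"].any (fun kw => PySem.Str.isIn kw prompt_lower)) then
    true
  else if PySem.Str.isIn "implementation-focused" rule && (["implement", "create", "build", "develop"].any (fun kw => PySem.Str.isIn kw prompt_lower)) then
    true
  else
    false

-- ===== PORT B =====
def pvMarkers : List String :=
  ["loan/mortgage/credit keywords",
   "payment/transfer/wire keywords",
   "card/plastic/rewards keywords",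
   "investment/portfolio/trading keywords",
   "KYC/AML/compliance keywords",
   "epic-level transformation",
   "implementation-focused"]

def pvKeywords : List (List String) :=
  [["loan", "mortgage", "credit", "lending"],
   ["payment", "transfer", "wire", "transaction"],
   ["card", "plastic", "rewards", "credit card"],
   ["investment", "portfolio", "trading", "wealth"],
   ["kyc", "aml", "compliance", "regulation"],
   ["epic", "platform", "system", "transformation"],
   ["implement", "create", "build", "develop"]]

def evaluate_routing_rule_py_alt (rule : String) (prompt_lower : String) (context : List (String × Int)) : Bool :=
  -- Stage 1: bitmask of categories whose keywords appear in the prompt.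
  let prompt_flags : Nat :=
    (PySem.List.enumerate pvKeywords).foldl
      (fun acc p => if p.2.any (fun kw => PySem.Str.isIn kw prompt_lower) then acc ||| (1 <<< p.1.toNat) else acc) 0
  -- Stage 2: bitmask of categories whose marker appears in the rule.
  let rule_flags : Nat :=
    (PySem.List.enumerate pvMarkers).foldl
      (fun acc p => if PySem.Str.isIn p.2 rule then acc ||| (1 <<< p.1.toNat) else acc) 0
  decide (prompt_flags &&& rule_flags ≠ 0)

-- ===== PRECONDITION & SPEC =====
def Spec_evaluate_routing_rule_py (rule : String) (prompt_lower : String) (context : List (String × Int)) (out : Bool) : Prop := out = evaluate_routing_rule_py_alt rule prompt_lower context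
instance (rule : String) (prompt_lower : String) (context : List (String × Int)) (out : Bool) : Decidable (Spec_evaluate_routing_rule_py rule prompt_lower context out) := by unfold Spec_evaluate_routing_rule_py; infer_instance

-- ===== CLAIM =====
def Claim_equal_evaluate_routing_rule_py : Prop := ∀ (rule : String) (prompt_lower : String) (context : List (String × Int)), Dom_evaluate_routing_rule_py rule prompt_lower context → Spec_evaluate_routing_rule_py rule prompt_lower context (evaluate_routing_rule_py rule prompt_lower context)

-- ===== LEMMAS AND PROOFS =====

-- ===== VERDICT =====
theorem evaluate_routing_rule_py_spec : Claim_equal_evaluate_routing_rule_py := by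
  intro rule prompt_lower context _
  unfold Spec_evaluate_routing_rule_py evaluate_routing_rule_py evaluate_routing_rule_py_alt pvMarkers pvKeywords
  simp only [PySem.List.enumerate_cons, PySem.List.enumerate_nil, List.foldl_cons, List.foldl_nil,
    List.any_cons, List.any_nil, Bool.or_false]
  generalize PySem.Str.isIn "loan/mortgage/credit keywords" rule = m1
  generalize PySem.Str.isIn "payment/transfer/wire keywords" rule = m2
  generalize PySem.Str.isIn "card/plastic/rewards keywords" rule = m3
  generalize PySem.Str.isIn "investment/portfolio/trading keywords" rule = m4
  generalize PySem.Str.isIn "KYC/AML/compliance keywords" rule = m5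
  generalize PySem.Str.isIn "epic-level transformation" rule = m6
  generalize PySem.Str.isIn "implementation-focused" rule = m7
  generalize (PySem.Str.isIn "loan" prompt_lower || (PySem.Str.isIn "mortgage" prompt_lower || (PySem.Str.isIn "credit" prompt_lower || PySem.Str.isIn "lending" prompt_lower))) = k1
  generalize (PySem.Str.isIn "payment" prompt_lower || (PySem.Str.isIn "transfer" prompt_lower || (PySem.Str.isIn "wire" prompt_lower || PySem.Str.isIn "transaction" prompt_lower))) = k2
  generalize (PySem.Str.isIn "card" prompt_lower || (PySem.Str.isIn "plastic" prompt_lower || (PySem.Str.isIn "rewards" prompt_lower || PySem.Str.isIn "credit card" prompt_lower))) = k3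
  generalize (PySem.Str.isIn "investment" prompt_lower || (PySem.Str.isIn "portfolio" prompt_lower || (PySem.Str.isIn "trading" prompt_lower || PySem.Str.isIn "wealth" prompt_lower))) = k4
  generalize (PySem.Str.isIn "kyc" prompt_lower || (PySem.Str.isIn "aml" prompt_lower || (PySem.Str.isIn "compliance" prompt_lower || PySem.Str.isIn "regulation" prompt_lower))) = k5
  generalize (PySem.Str.isIn "epic" prompt_lower || (PySem.Str.isIn "platform" prompt_lower || (PySem.Str.isIn "system" prompt_lower || PySem.Str.isIn "transformation" prompt_lower))) = k6
  generalize (PySem.Str.isIn "implement" prompt_lower || (PySem.Str.isIn "create" prompt_lower || (PySem.Str.isIn "build" prompt_lower || PySem.Str.isIn "develop" prompt_lower))) = k7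
  revert m1 m2 m3 m4 m5 m6 m7 k1 k2 k3 k4 k5 k6 k7
  decide
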